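-- pv_equiv track=rewrite | github.com/garrettjanderson/projects | OrgAnalytix/src/clean_text.py | find_quote_ind
-- ===== SOURCE A (Python) =====
-- def find_quote_ind(text_sent):
--     '''
--     Finds indices and quotes for text lines containing dialogue
--     Input: Sentence tokenized text
--     Output: all_quote_indices (list of lists of ints, each sublist containing a distinct dialogue chunk)
--     '''
--     #Enumerate sentences and keep only those with quotation marks in them
--     text_enum = enumerate(text_sent)
--     text_chunks = [idx for idx, sent in text_enum if '"' in sent]
--
--     #Group all dialogue sentences based on continuity of numerical indices
--     indices = []
--     from itertools import groupby
--     from operator import itemgetter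
--     data = text_chunks.copy()
--     for idx, sent in groupby(enumerate(text_chunks), lambda ix: ix[0]-ix[1]):
--         indices.append(list(map(itemgetter(1), sent)))
--     return indices
-- ===== SOURCE B (Python) =====
-- def find_quote_ind(text_sent):
--     '''One-pass version: scan the sentences once, keeping the index of the
--     last quote sentence seen; extend the current run or open a new one.'''
--     indices = []
--     prev = None
--     for i, sent in enumerate(text_sent):
--         if '"' in sent:
--             if prev is not None and i == prev + 1:
--                 indices[-1].append(i)
--             else:
--                 indices.append([i])
--             prev = i
--     return indices
-- ===== Notes on version B (the rewrite author's own statement) =====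
-- stated objective: simpler
-- what changed: Replaces the filter-then-groupby(idx-value) pipeline (enumerate, comprehension, itertools.groupby over a second enumerate) with a single scan that maintains the result list and the previous quote index, extending the last run or opening a new one.
import Mathlib
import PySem

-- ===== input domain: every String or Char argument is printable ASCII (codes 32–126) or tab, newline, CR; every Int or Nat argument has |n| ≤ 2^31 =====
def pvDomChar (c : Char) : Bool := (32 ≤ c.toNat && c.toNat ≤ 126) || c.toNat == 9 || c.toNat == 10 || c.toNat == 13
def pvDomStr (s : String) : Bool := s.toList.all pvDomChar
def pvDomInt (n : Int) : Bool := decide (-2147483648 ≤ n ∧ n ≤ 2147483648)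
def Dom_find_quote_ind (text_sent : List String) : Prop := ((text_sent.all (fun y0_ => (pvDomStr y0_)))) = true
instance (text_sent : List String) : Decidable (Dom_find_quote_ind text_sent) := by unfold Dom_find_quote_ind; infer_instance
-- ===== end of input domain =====

-- B replaces A's filter + itertools.groupby(idx-value) pipeline with one scan keeping the
-- previous quote index (objective: simpler); same return value on every input.

-- ===== PORT A =====
-- itertools.groupby: a group is a maximal block of adjacent pairs with the same key i - v.
def pvTakeRun (k : Int) : List (Int × Int) → List Int × List (Int × Int)
  | [] => ([], [])
  | p :: rest =>
      if p.1 - p.2 = k then (p.2 :: (pvTakeRun k rest).1, (pvTakeRun k rest).2)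
      else ([], p :: rest)

theorem pvTakeRun_length_le (k : Int) (l : List (Int × Int)) :
    (pvTakeRun k l).2.length ≤ l.length := by
  induction l with
  | nil => simp [pvTakeRun]
  | cons p rest ih =>
      by_cases h : p.1 - p.2 = k
      · simp only [pvTakeRun, if_pos h, List.length_cons]; omega
      · simp [pvTakeRun, h]

-- the groupby loop: for each group append list(map(itemgetter(1), sent))
def pvGroupby : List (Int × Int) → List (List Int)
  | [] => []
  | p :: rest =>
      (p.2 :: (pvTakeRun (p.1 - p.2) rest).1) :: pvGroupby (pvTakeRun (p.1 - p.2) rest).2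
termination_by l => l.length
decreasing_by
  have := pvTakeRun_length_le (p.1 - p.2) rest
  simp only [List.length_cons]
  omega

def find_quote_ind (text_sent : List String) : List (List Int) :=
  -- text_chunks = [idx for idx, sent in enumerate(text_sent) if '"' in sent]
  let text_chunks : List Int :=
    (PySem.List.enumerate text_sent).filterMap
      (fun p => if PySem.Str.isIn "\"" p.2 then some p.1 else none)
  -- (data = text_chunks.copy() in A is dead code)
  pvGroupby (PySem.List.enumerate text_chunks)

-- ===== PORT B =====
-- indices[-1].append(i)
def pvAppendLast : List (List Int) → Int → List (List Int)
  | [], x => [[x]]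
  | [g], x => [g ++ [x]]
  | g :: gs, x => g :: pvAppendLast gs x

-- one iteration of B's for-loop, state = (indices, prev)
def pvStepB (st : List (List Int) × Option Int) (p : Int × String) :
    List (List Int) × Option Int :=
  if PySem.Str.isIn "\"" p.2 then
    match st.2 with
    | some prev =>
        if p.1 = prev + 1 then (pvAppendLast st.1 p.1, some p.1)
        else (st.1 ++ [[p.1]], some p.1)
    | none => (st.1 ++ [[p.1]], some p.1)
  else st

def find_quote_ind_alt (text_sent : List String) : List (List Int) :=
  ((PySem.List.enumerate text_sent).foldl pvStepB ([], none)).1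

-- ===== PRECONDITION & SPEC =====
def Spec_find_quote_ind (text_sent : List String) (out : List (List Int)) : Prop := out = find_quote_ind_alt text_sent
instance (text_sent : List String) (out : List (List Int)) : Decidable (Spec_find_quote_ind text_sent out) := by unfold Spec_find_quote_ind; infer_instance

-- ===== CLAIM (what is proved, stated in full; the proofs are below) =====
def Claim_equal_find_quote_ind : Prop := ∀ (text_sent : List String), Dom_find_quote_ind text_sent → Spec_find_quote_ind text_sent (find_quote_ind text_sent)

-- ===== LEMMAS AND PROOFS =====

theorem pvGroupby_nil : pvGroupby [] = [] := by rw [pvGroupby]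

theorem pvGroupby_cons (p : Int × Int) (rest : List (Int × Int)) :
    pvGroupby (p :: rest) =
      (p.2 :: (pvTakeRun (p.1 - p.2) rest).1) :: pvGroupby (pvTakeRun (p.1 - p.2) rest).2 := by
  rw [pvGroupby]

-- B's loop body restricted to the quote indices (the only elements that change the state).
def pvStepC (st : List (List Int) × Option Int) (v : Int) :
    List (List Int) × Option Int :=
  match st.2 with
  | some prev =>
      if v = prev + 1 then (pvAppendLast st.1 v, some v)
      else (st.1 ++ [[v]], some v)
  | none => (st.1 ++ [[v]], some v)

theorem pvStepB_eq (st : List (List Int) × Option Int) (i : Int) (x : String) :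
    pvStepB st (i, x) = if PySem.Str.isIn "\"" x then pvStepC st i else st := rfl

-- the maximal consecutive run continuing v, and the remainder
def pvRun (v : Int) : List Int → List Int × List Int
  | [] => ([], [])
  | x :: xs =>
      if x = v + 1 then (x :: (pvRun x xs).1, (pvRun x xs).2)
      else ([], x :: xs)

theorem pvRun_length_le (v : Int) (xs : List Int) :
    (pvRun v xs).2.length ≤ xs.length := by
  induction xs generalizing v with
  | nil => simp [pvRun]
  | cons x xs ih =>
      by_cases h : x = v + 1
      · simp only [pvRun, if_pos h, List.length_cons]
        have := ih x; omega
      · simp [pvRun, h]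

-- grouping into maximal consecutive runs
def pvGroups : List Int → List (List Int)
  | [] => []
  | x :: xs => (x :: (pvRun x xs).1) :: pvGroups (pvRun x xs).2
termination_by l => l.length
decreasing_by
  have := pvRun_length_le x xs
  simp only [List.length_cons]
  omega

theorem pvGroups_nil : pvGroups [] = [] := by rw [pvGroups]

theorem pvGroups_cons (x : Int) (xs : List Int) :
    pvGroups (x :: xs) = (x :: (pvRun x xs).1) :: pvGroups (pvRun x xs).2 := by
  rw [pvGroups]

-- A's groupby key i - v is constant exactly along consecutive runs
theorem takeRun_enum (xs : List Int) : ∀ (s v : Int),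
    pvTakeRun (s - v) (PySem.List.enumerate xs (s + 1)) =
      ((pvRun v xs).1,
       PySem.List.enumerate (pvRun v xs).2 (s + 1 + ((pvRun v xs).1.length : Int))) := by
  induction xs with
  | nil => intro s v; simp [pvRun, pvTakeRun, PySem.List.enumerate_nil]
  | cons x xs ih =>
      intro s v
      rw [PySem.List.enumerate_cons]
      by_cases h : x = v + 1
      · have hk : s + 1 - x = s - v := by omega
        have hrec := ih (s + 1) x
        rw [hk] at hrec
        simp only [pvTakeRun, pvRun, if_pos h, if_pos hk, hrec, Prod.mk.injEq, true_and,
          List.length_cons]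
        congr 1
        push_cast; ring
      · have hk : ¬ (s + 1 - x = s - v) := by omega
        simp only [pvTakeRun, pvRun, if_neg h, if_neg hk]
        rw [PySem.List.enumerate_cons]
        simp

theorem groupby_enum (xs : List Int) : ∀ (s : Int),
    pvGroupby (PySem.List.enumerate xs s) = pvGroups xs := by
  induction hn : xs.length using Nat.strong_induction_on generalizing xs with
  | _ n ih =>
    cases xs with
    | nil => intro s; rw [PySem.List.enumerate_nil, pvGroupby_nil, pvGroups_nil]
    | cons x xs =>
        intro s
        rw [PySem.List.enumerate_cons, pvGroupby_cons, pvGroups_cons]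
        have ht := takeRun_enum xs s x
        simp only [] at ht ⊢
        rw [show (s, x).1 - (s, x).2 = s - x from rfl, ht]
        have hlt : (pvRun x xs).2.length < n := by
          have := pvRun_length_le x xs
          simp only [List.length_cons] at hn; omega
        rw [ih _ hlt _ rfl]

-- after a run breaks, the next element does not extend it
theorem pvRun_break (v : Int) (xs : List Int) :
    ∀ y, (pvRun v xs).2.head? = some y → y ≠ (pvRun v xs).1.getLastD v + 1 := by
  induction xs generalizing v with
  | nil => simp [pvRun]
  | cons x xs ih =>
      intro y
      by_cases h : x = v + 1
      · simp only [pvRun, if_pos h]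
        intro hy
        rw [List.getLastD_cons]
        exact ih x y hy
      · simp only [pvRun, if_neg h, List.head?_cons, List.getLastD_nil]
        intro hy; cases hy; omega

theorem appendLast_snoc (acc : List (List Int)) (g : List Int) (x : Int) :
    pvAppendLast (acc ++ [g]) x = acc ++ [g ++ [x]] := by
  induction acc with
  | nil => rfl
  | cons a acc ih =>
      cases acc with
      | nil => rfl
      | cons b acc => simpa [pvAppendLast] using ih

theorem foldl_appendLast_snoc (r : List Int) : ∀ (acc : List (List Int)) (g : List Int),
    r.foldl pvAppendLast (acc ++ [g]) = acc ++ [g ++ r] := by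
  induction r with
  | nil => intro acc g; simp
  | cons x r ih =>
      intro acc g
      rw [List.foldl_cons, appendLast_snoc, ih, List.append_assoc, List.singleton_append]

-- consuming a run with stepC
theorem foldl_stepC_run (xs : List Int) : ∀ (v : Int) (acc : List (List Int)),
    xs.foldl pvStepC (acc, some v) =
      (pvRun v xs).2.foldl pvStepC
        ((pvRun v xs).1.foldl pvAppendLast acc, some ((pvRun v xs).1.getLastD v)) := by
  induction xs with
  | nil => intro v acc; simp [pvRun]
  | cons x xs ih =>
      intro v acc
      by_cases h : x = v + 1
      · simp only [pvRun, List.foldl_cons, pvStepC, if_pos h]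
        rw [ih x (pvAppendLast acc x), List.getLastD_cons]
      · simp only [pvRun, List.foldl_cons, pvStepC, if_neg h, List.getLastD_nil,
          List.foldl_nil]

-- main invariant: from a state whose prev does not extend the next element,
-- the fold appends pvGroups of the remaining quote indices.
theorem foldl_stepC_fresh (n : Nat) : ∀ (xs : List Int), xs.length ≤ n →
    ∀ (acc : List (List Int)) (popt : Option Int),
      (∀ p y, popt = some p → xs.head? = some y → y ≠ p + 1) →
      (xs.foldl pvStepC (acc, popt)).1 = acc ++ pvGroups xs := by
  induction n with
  | zero =>
      intro xs hlen acc popt _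
      have : xs = [] := List.eq_nil_of_length_eq_zero (Nat.le_zero.mp hlen)
      subst this; simp [pvGroups_nil]
  | succ n ih =>
      intro xs hlen acc popt hfresh
      cases xs with
      | nil => simp [pvGroups_nil]
      | cons x xs =>
          have hstep : pvStepC (acc, popt) x = (acc ++ [[x]], some x) := by
            cases popt with
            | none => rfl
            | some p =>
                have := hfresh p x rfl rfl
                simp [pvStepC, this]
          rw [List.foldl_cons, hstep, foldl_stepC_run xs x (acc ++ [[x]])]
          rw [foldl_appendLast_snoc]
          have hlt : (pvRun x xs).2.length ≤ n := by
            have := pvRun_length_le x xs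
            simp only [List.length_cons] at hlen; omega
          rw [ih _ hlt _ _ (by
            intro p y hp hy
            simp only [Option.some.injEq] at hp
            subst hp
            exact pvRun_break x xs y hy)]
          rw [pvGroups_cons]
          simp

-- stepping B over enumerate(text_sent) = stepping stepC over the quote indices
theorem foldl_stepB_filter (l : List String) : ∀ (s : Int) (st : List (List Int) × Option Int),
    (PySem.List.enumerate l s).foldl pvStepB st =
      ((PySem.List.enumerate l s).filterMap
        (fun p => if PySem.Str.isIn "\"" p.2 then some p.1 else none)).foldl pvStepC st := by
  induction l with
  | nil => intro s st; simp [PySem.List.enumerate_nil]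
  | cons x l ih =>
      intro s st
      rw [PySem.List.enumerate_cons, List.foldl_cons, List.filterMap_cons, pvStepB_eq]
      simp only [PySem.Str.isIn]
      by_cases h : PySem.Chars.isIn "\"".toList x.toList = true
      · simp only [h, ite_true, List.foldl_cons]
        simpa only [PySem.Str.isIn] using ih (s + 1) (pvStepC st s)
      · rw [Bool.not_eq_true] at h
        simp only [h, Bool.false_eq_true, ite_false]
        simpa only [PySem.Str.isIn] using ih (s + 1) st

-- ===== VERDICT (by name: the statement is the Claim_ definition above) =====
theorem find_quote_ind_spec : Claim_equal_find_quote_ind := by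
  intro text_sent _
  unfold Spec_find_quote_ind find_quote_ind find_quote_ind_alt
  rw [foldl_stepB_filter text_sent 0 ([], none)]
  rw [groupby_enum _ 0]
  rw [foldl_stepC_fresh _ _ (le_refl _) [] none (by simp)]
  simp
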